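-- pv_equiv track=rewrite | github.com/WellitonGomes/Inverter | inverter.py | cria_listas
-- ===== SOURCE A (Python) =====
-- def cria_listas(numero):
--     numeros_inferiores = []
--     par = []
--     impar = []
--     for aux in range(numero+1):
--         numeros_inferiores.append(aux)
--         if aux % 2 == 0:
--             par.append(aux)
--         else:
--             impar.append(aux)
--     return numeros_inferiores, par, impar
-- ===== SOURCE B (Python) =====
-- def cria_listas(numero):
--     numeros_inferiores = list(range(numero + 1))
--     par = list(range(0, numero + 1, 2))
--     impar = list(range(1, numero + 1, 2))
--     return numeros_inferiores, par, impar
-- ===== Notes on version B (the rewrite author's own statement) =====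
-- stated objective: simpler
-- what changed: The single loop with a parity branch and three accumulators is replaced by three direct stepped-range constructions (range with step 2 for evens/odds), eliminating the loop body entirely.
import Mathlib
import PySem

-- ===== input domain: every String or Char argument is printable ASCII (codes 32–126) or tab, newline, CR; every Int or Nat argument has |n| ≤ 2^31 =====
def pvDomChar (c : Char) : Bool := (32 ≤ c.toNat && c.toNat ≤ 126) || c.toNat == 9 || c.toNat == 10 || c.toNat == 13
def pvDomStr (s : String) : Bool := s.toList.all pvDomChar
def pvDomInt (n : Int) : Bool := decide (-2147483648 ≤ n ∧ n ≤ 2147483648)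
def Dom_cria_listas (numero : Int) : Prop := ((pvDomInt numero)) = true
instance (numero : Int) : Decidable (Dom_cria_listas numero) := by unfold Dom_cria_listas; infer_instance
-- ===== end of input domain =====

-- B replaces A's parity-dispatching loop with three direct stepped-range constructions (simpler).

-- ===== PORT A =====
-- one loop over range(numero+1); unconditional append to the first list, parity branch for the other two
def cria_listas (numero : Int) : List Int × List Int × List Int :=
  (PySem.List.pyRange 0 (numero + 1) 1).foldl
    (fun (s : List Int × List Int × List Int) aux =>
      if PySem.Int.mod aux 2 == 0 then (s.1 ++ [aux], s.2.1 ++ [aux], s.2.2)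
      else (s.1 ++ [aux], s.2.1, s.2.2 ++ [aux]))
    ([], [], [])

-- ===== PORT B =====
def cria_listas_alt (numero : Int) : List Int × List Int × List Int :=
  (PySem.List.pyRange 0 (numero + 1) 1,
   PySem.List.pyRange 0 (numero + 1) 2,
   PySem.List.pyRange 1 (numero + 1) 2)

-- ===== PRECONDITION & SPEC =====
def Spec_cria_listas (numero : Int) (out : List Int × List Int × List Int) : Prop := out = cria_listas_alt numero
instance (numero : Int) (out : List Int × List Int × List Int) : Decidable (Spec_cria_listas numero out) := by unfold Spec_cria_listas; infer_instance

-- ===== CLAIM (what is proved, stated in full; the proofs are below) =====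
def Claim_equal_cria_listas : Prop := ∀ (numero : Int), Dom_cria_listas numero → Spec_cria_listas numero (cria_listas numero)

-- ===== LEMMAS AND PROOFS =====

-- the loop body of port A, named for the proofs
def criaStep (s : List Int × List Int × List Int) (aux : Int) : List Int × List Int × List Int :=
  if PySem.Int.mod aux 2 == 0 then (s.1 ++ [aux], s.2.1 ++ [aux], s.2.2)
  else (s.1 ++ [aux], s.2.1, s.2.2 ++ [aux])

lemma even_step_right (n : Nat) (h : n % 2 = 0) :
    PySem.List.pyRange 0 ((n : Int) + 1) 2 = PySem.List.pyRange 0 (n : Int) 2 ++ [(n : Int)] := by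
  rw [PySem.List.pyRange_of_pos _ _ (by norm_num : (0:Int) < 2),
      PySem.List.pyRange_of_pos _ _ (by norm_num : (0:Int) < 2)]
  have h1 : (if (0:Int) < (n : Int) + 1 then (((n : Int) + 1 - 0 + 2 - 1) / 2).toNat else 0) = n / 2 + 1 := by
    split_ifs with hc <;> omega
  have h2 : (if (0:Int) < (n : Int) then (((n : Int) - 0 + 2 - 1) / 2).toNat else 0) = n / 2 := by
    split_ifs with hc <;> omega
  rw [h1, h2, List.range_succ, List.map_append]
  simp
  omega

lemma even_odd_same (n : Nat) (h : n % 2 = 0) :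
    PySem.List.pyRange 1 ((n : Int) + 1) 2 = PySem.List.pyRange 1 (n : Int) 2 := by
  rw [PySem.List.pyRange_of_pos _ _ (by norm_num : (0:Int) < 2),
      PySem.List.pyRange_of_pos _ _ (by norm_num : (0:Int) < 2)]
  have h1 : (if (1:Int) < (n : Int) + 1 then (((n : Int) + 1 - 1 + 2 - 1) / 2).toNat else 0)
      = (if (1:Int) < (n : Int) then (((n : Int) - 1 + 2 - 1) / 2).toNat else 0) := by
    split_ifs with hc hd <;> omega
  rw [h1]

lemma odd_step_right (n : Nat) (h : n % 2 = 1) :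
    PySem.List.pyRange 1 ((n : Int) + 1) 2 = PySem.List.pyRange 1 (n : Int) 2 ++ [(n : Int)] := by
  rw [PySem.List.pyRange_of_pos _ _ (by norm_num : (0:Int) < 2),
      PySem.List.pyRange_of_pos _ _ (by norm_num : (0:Int) < 2)]
  have h1 : (if (1:Int) < (n : Int) + 1 then (((n : Int) + 1 - 1 + 2 - 1) / 2).toNat else 0) = n / 2 + 1 := by
    split_ifs with hc <;> omega
  have h2 : (if (1:Int) < (n : Int) then (((n : Int) - 1 + 2 - 1) / 2).toNat else 0) = n / 2 := by
    split_ifs with hc <;> omega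
  rw [h1, h2, List.range_succ, List.map_append]
  simp
  omega

lemma odd_even_same (n : Nat) (h : n % 2 = 1) :
    PySem.List.pyRange 0 ((n : Int) + 1) 2 = PySem.List.pyRange 0 (n : Int) 2 := by
  rw [PySem.List.pyRange_of_pos _ _ (by norm_num : (0:Int) < 2),
      PySem.List.pyRange_of_pos _ _ (by norm_num : (0:Int) < 2)]
  have h1 : (if (0:Int) < (n : Int) + 1 then (((n : Int) + 1 - 0 + 2 - 1) / 2).toNat else 0)
      = (if (0:Int) < (n : Int) then (((n : Int) - 0 + 2 - 1) / 2).toNat else 0) := by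
    split_ifs with hc hd <;> omega
  rw [h1]

lemma mod_cast_nat (n : Nat) : PySem.Int.mod (n : Int) 2 = ((n % 2 : Nat) : Int) := by
  have : Int.fmod (n : Int) 2 = (n : Int) % 2 := Int.fmod_eq_emod_of_nonneg _ (by norm_num)
  simp [PySem.Int.mod, this]


lemma loop_inv (n : Nat) :
    (PySem.List.pyRange 0 (n : Int) 1).foldl criaStep ([], [], []) =
      (PySem.List.pyRange 0 (n : Int) 1, PySem.List.pyRange 0 (n : Int) 2, PySem.List.pyRange 1 (n : Int) 2) := by
  induction n with
  | zero =>
      simp [PySem.List.pyRange_one_eq_nil (le_refl (0:Int)),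
            PySem.List.pyRange_of_pos _ _ (by norm_num : (0:Int) < 2)]
  | succ n ih =>
      have hcast : ((n + 1 : Nat) : Int) = (n : Int) + 1 := by push_cast; ring
      rw [hcast, PySem.List.pyRange_one_succ_right (by positivity : (0:Int) ≤ (n : Int)),
          List.foldl_append, ih]
      rcases Nat.even_or_odd n with he | ho
      · have h : n % 2 = 0 := Nat.even_iff.mp he
        simp only [List.foldl, criaStep, mod_cast_nat, h]
        rw [even_step_right n h, even_odd_same n h]
        simp
      · have h : n % 2 = 1 := Nat.odd_iff.mp ho
        simp only [List.foldl, criaStep, mod_cast_nat, h]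
        rw [odd_step_right n h, odd_even_same n h]
        simp

-- ===== VERDICT (by name: the statement is the Claim_ definition above) =====
theorem cria_listas_spec : Claim_equal_cria_listas := by
  intro numero _
  unfold Spec_cria_listas cria_listas cria_listas_alt
  by_cases hneg : numero + 1 ≤ 0
  · rw [PySem.List.pyRange_one_eq_nil hneg]
    simp [PySem.List.pyRange_of_pos _ _ (by norm_num : (0:Int) < 2),
          show ¬ (0:Int) < numero + 1 by omega, show ¬ (1:Int) < numero + 1 by omega]
  · have h0 : (0:Int) ≤ numero + 1 := by omega
    have hcast : numero + 1 = (((numero + 1).toNat : Nat) : Int) := by omega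
    rw [hcast]
    exact (loop_inv (numero + 1).toNat)
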